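-- pv_equiv track=rewrite | github.com/Rasulid/ba-semester-2 | FSP-R-2-22/semestr_2/lesson_19/home_work.py | count_loop_iterations
-- ===== SOURCE A (Python) =====
-- def count_loop_iterations(arr):
--     res = []
--     acc = 1
--     for n, b in arr:
--         n = n + 2 if b else n + 1
--         res.append(acc * n)
--         acc *= n - 1
--     return res
-- ===== SOURCE B (Python) =====
-- def count_loop_iterations(arr):
--     if not arr:
--         return []
--     n, b = arr[0]
--     v = n + 2 if b else n + 1
--     return [v] + [(v - 1) * r for r in count_loop_iterations(arr[1:])]
-- ===== Notes on version B (the rewrite author's own statement) =====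
-- stated objective: alternative
-- what changed: Replaces A's left-to-right fused loop carrying a running product accumulator with a head-first structural recursion that keeps no accumulator at all: it computes the tail's answer and rescales every tail entry by (head-1), trading O(n) multiplications for O(n^2).
import Mathlib
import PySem

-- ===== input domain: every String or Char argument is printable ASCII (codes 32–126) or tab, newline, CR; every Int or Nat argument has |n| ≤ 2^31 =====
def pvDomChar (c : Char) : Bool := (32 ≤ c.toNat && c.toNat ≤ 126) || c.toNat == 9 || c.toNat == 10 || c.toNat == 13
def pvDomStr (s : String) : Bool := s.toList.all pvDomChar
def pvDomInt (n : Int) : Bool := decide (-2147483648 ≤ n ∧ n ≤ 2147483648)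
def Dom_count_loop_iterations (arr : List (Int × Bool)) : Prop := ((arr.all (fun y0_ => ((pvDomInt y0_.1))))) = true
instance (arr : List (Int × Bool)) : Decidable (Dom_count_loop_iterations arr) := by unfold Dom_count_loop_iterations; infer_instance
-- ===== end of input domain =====

-- B replaces A's accumulator loop with an accumulator-free head-first recursion that rescales the tail's answer; alternative decomposition (more multiplications, not faster).

-- ===== PORT A =====
-- A: one fold carrying (res, acc); appends acc*n, updates acc *= n-1.
def count_loop_iterations (arr : List (Int × Bool)) : List Int :=
  (arr.foldl (fun (s : List Int × Int) p =>
      let n : Int := if p.2 then p.1 + 2 else p.1 + 1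
      (s.1 ++ [s.2 * n], s.2 * (n - 1))) ([], 1)).1

-- ===== PORT B =====
-- B: recursion on the list; head's adjusted value v, then every tail result scaled by (v-1).
def count_loop_iterations_alt : List (Int × Bool) → List Int
  | [] => []
  | (n, b) :: rest =>
      let v : Int := if b then n + 2 else n + 1
      v :: (count_loop_iterations_alt rest).map (fun r => (v - 1) * r)

-- ===== PRECONDITION & SPEC =====
def Spec_count_loop_iterations (arr : List (Int × Bool)) (out : List Int) : Prop := out = count_loop_iterations_alt arr
instance (arr : List (Int × Bool)) (out : List Int) : Decidable (Spec_count_loop_iterations arr out) := by unfold Spec_count_loop_iterations; infer_instance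

-- ===== CLAIM (what is proved, stated in full; the proofs are below) =====
def Claim_equal_count_loop_iterations : Prop := ∀ (arr : List (Int × Bool)), Dom_count_loop_iterations arr → Spec_count_loop_iterations arr (count_loop_iterations arr)

-- ===== LEMMAS AND PROOFS =====

-- A's fold from state (res, acc) produces res ++ (acc scaled over B's recursion).
theorem pvA_fold (arr : List (Int × Bool)) : ∀ (res : List Int) (acc : Int),
    (arr.foldl (fun (s : List Int × Int) p =>
      let n : Int := if p.2 then p.1 + 2 else p.1 + 1
      (s.1 ++ [s.2 * n], s.2 * (n - 1))) (res, acc)).1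
    = res ++ (count_loop_iterations_alt arr).map (fun r => acc * r) := by
  induction arr with
  | nil => intro res acc; simp [count_loop_iterations_alt]
  | cons p t ih =>
    intro res acc
    obtain ⟨n, b⟩ := p
    simp only [List.foldl_cons, count_loop_iterations_alt]
    rw [ih]
    simp [List.map_map, mul_assoc, List.append_assoc]

-- ===== VERDICT (by name: the statement is the Claim_ definition above) =====
theorem count_loop_iterations_spec : Claim_equal_count_loop_iterations := by
  intro arr _
  show count_loop_iterations arr = count_loop_iterations_alt arr
  unfold count_loop_iterations
  rw [pvA_fold]
  simp
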